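-- pv_equiv track=rewrite | github.com/IncidentFlow-io/incidentflow-mcp | src/incidentflow_mcp/mcp/server.py | _normalize_providers
-- ===== SOURCE A (Python) =====
-- def _normalize_providers(providers: list[str] | None) -> list[str]:
--     if not providers:
--         return ["aws", "github"]
--
--     allowed = {"aws", "github"}
--     normalized = [item.strip().lower() for item in providers if item.strip()]
--     if not normalized:
--         return ["aws", "github"]
--
--     invalid = [item for item in normalized if item not in allowed]
--     if invalid:
--         raise ValueError(f"Unsupported provider(s): {', '.join(invalid)}")
--
--     seen: set[str] = set()
--     ordered: list[str] = []
--     for item in normalized: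
--         if item in seen:
--             continue
--         seen.add(item)
--         ordered.append(item)
--     return ordered
-- ===== SOURCE B (Python) =====
-- def _normalize_providers(providers: list[str] | None) -> list[str]:
--     if not providers:
--         return ["aws", "github"]
--
--     first_aws = first_gh = None
--     invalid: list[str] = []
--     for idx, item in enumerate(providers):
--         s = item.strip().lower()
--         if not s:
--             continue
--         if s == "aws":
--             if first_aws is None:
--                 first_aws = idx
--         elif s == "github":
--             if first_gh is None:
--                 first_gh = idx
--         else:
--             invalid.append(s)
--
--     if invalid:
--         raise ValueError(f"Unsupported provider(s): {', '.join(invalid)}")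
--
--     if first_aws is None and first_gh is None:
--         return ["aws", "github"]
--     if first_gh is None:
--         return ["aws"]
--     if first_aws is None:
--         return ["github"]
--     return ["aws", "github"] if first_aws < first_gh else ["github", "aws"]
-- ===== Notes on version B (the rewrite author's own statement) =====
-- stated objective: alternative
-- what changed: Instead of building a normalized list and order-preservingly deduping with a seen set, B exploits that only two provider names are allowed: it records the first-occurrence index of 'aws' and of 'github' (and collects invalids) in one enumerate pass, then assembles the result by comparing the two indices.
import Mathlib
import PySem

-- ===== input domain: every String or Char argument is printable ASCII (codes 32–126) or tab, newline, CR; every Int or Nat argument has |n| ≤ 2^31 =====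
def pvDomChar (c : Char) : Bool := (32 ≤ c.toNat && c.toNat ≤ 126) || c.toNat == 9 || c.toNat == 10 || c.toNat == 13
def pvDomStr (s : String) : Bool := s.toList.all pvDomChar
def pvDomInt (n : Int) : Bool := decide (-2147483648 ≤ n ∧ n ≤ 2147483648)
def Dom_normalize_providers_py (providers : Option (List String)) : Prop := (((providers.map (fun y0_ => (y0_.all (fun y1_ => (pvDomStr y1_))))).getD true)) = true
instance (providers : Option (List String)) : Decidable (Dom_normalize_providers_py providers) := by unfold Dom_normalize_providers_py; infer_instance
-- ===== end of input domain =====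

-- B replaces A's normalize/validate/dedup passes by recording the first-occurrence index of each
-- of the two allowed names in one enumerate pass and ordering them by index (objective: alternative).

-- ===== PORT A =====
-- dedup loop step of A: 'if item in seen: continue; seen.add(item); ordered.append(item)'
def pvAStep (st : PySem.Set String × List String) (item : String) : PySem.Set String × List String :=
  if PySem.Set.contains st.1 item then st
  else (PySem.Set.add st.1 item, st.2 ++ [item])

def normalize_providers_py (providers : Option (List String)) : List String :=
  match providers with
  | none => ["aws", "github"]
  | some ps =>
    if ps = [] then ["aws", "github"]
    else
      let allowed : PySem.Set String := PySem.Set.ofList ["aws", "github"]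
      let normalized := (ps.filter (fun item => !(PySem.Str.strip item == ""))).map
        (fun item => PySem.Str.lower (PySem.Str.strip item))
      if normalized = [] then ["aws", "github"]
      else
        let invalid := normalized.filter (fun item => !(PySem.Set.contains allowed item))
        if invalid ≠ [] then []   -- raise ValueError: these inputs are outside Pre_
        else (normalized.foldl pvAStep (PySem.Set.empty, [])).2

-- ===== PORT B =====
-- loop body of B: record first index of "aws" / "github", collect invalid names
def pvBStep (st : Option Int × Option Int × List String) (p : Int × String) :
    Option Int × Option Int × List String :=
  let s := PySem.Str.lower (PySem.Str.strip p.2)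
  if s = "" then st
  else if s = "aws" then
    match st.1 with
    | none => (some p.1, st.2.1, st.2.2)
    | some _ => st
  else if s = "github" then
    match st.2.1 with
    | none => (st.1, some p.1, st.2.2)
    | some _ => st
  else (st.1, st.2.1, st.2.2 ++ [s])

def normalize_providers_py_alt (providers : Option (List String)) : List String :=
  match providers with
  | none => ["aws", "github"]
  | some ps =>
    if ps = [] then ["aws", "github"]
    else
      let st := (PySem.List.enumerate ps 0).foldl pvBStep (none, none, [])
      if st.2.2 ≠ [] then []    -- raise ValueError: these inputs are outside Pre_
      else
        match st.1, st.2.1 with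
        | none,   none   => ["aws", "github"]
        | some _, none   => ["aws"]
        | none,   some _ => ["github"]
        | some a, some g => if a < g then ["aws", "github"] else ["github", "aws"]

-- ===== PRECONDITION & SPEC =====
-- Pre_ excludes exactly the inputs with an unsupported provider name, on which BOTH
-- Pythons raise ValueError (with the same message); A is total everywhere else.
def Pre_normalize_providers_py (providers : Option (List String)) : Prop :=
  ∀ item ∈ providers.getD [], PySem.Str.strip item ≠ "" →
    (PySem.Str.lower (PySem.Str.strip item) = "aws" ∨
     PySem.Str.lower (PySem.Str.strip item) = "github")
instance (providers : Option (List String)) : Decidable (Pre_normalize_providers_py providers) := by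
  unfold Pre_normalize_providers_py; infer_instance

def pvWitness_normalize_providers_py : Option (List String) := some [" AWS ", "github", "", "aws"]

def Spec_normalize_providers_py (providers : Option (List String)) (out : List String) : Prop :=
  out = normalize_providers_py_alt providers
instance (providers : Option (List String)) (out : List String) :
    Decidable (Spec_normalize_providers_py providers out) := by
  unfold Spec_normalize_providers_py; infer_instance

-- ===== CLAIM =====
def Claim_equal_normalize_providers_py : Prop :=
  ∀ (providers : Option (List String)), Dom_normalize_providers_py providers →
    Pre_normalize_providers_py providers →
    Spec_normalize_providers_py providers (normalize_providers_py providers)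

-- ===== LEMMAS AND PROOFS =====

-- shorthand for "item is valid" used by the proofs
def pvOK (item : String) : Prop :=
  PySem.Str.strip item ≠ "" →
    (PySem.Str.lower (PySem.Str.strip item) = "aws" ∨
     PySem.Str.lower (PySem.Str.strip item) = "github")

lemma pvLowerEmpty (s : String) : PySem.Str.lower s = "" ↔ s = "" := by
  constructor
  · intro h
    have h2 := congrArg String.toList h
    rw [PySem.Str.toList_lower] at h2
    simp [PySem.Chars.lower] at h2
    cases s; simp_all
  · intro h; subst h; rfl

-- how B's final branches render a pair of first-occurrence indices
def pvRender (fa fg : Option Int) : List String :=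
  match fa, fg with
  | none,   none   => []
  | some _, none   => ["aws"]
  | none,   some _ => ["github"]
  | some a, some g => if a < g then ["aws", "github"] else ["github", "aws"]

-- main invariant: B's enumerate fold leaves invalids untouched on valid input, and A's
-- dedup fold over the normalized items produces exactly the rendering of B's two indices
-- membership after Set.add, as a Boolean equation
lemma pvContains_add (s : PySem.Set String) (x y : String) :
    PySem.Set.contains (PySem.Set.add s x) y = (PySem.Set.contains s y || y == x) := by
  by_cases h : x ∈ s
  · by_cases hyx : y = x <;> simp [PySem.Set.add, PySem.Set.contains, h, hyx]
  · by_cases hy : y ∈ s <;> by_cases hyx : y = x <;>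
      simp [PySem.Set.add, PySem.Set.contains, h, hy, hyx]

-- main invariant: B's enumerate fold leaves invalids untouched on valid input, and A's
-- dedup fold over the normalized items produces exactly the rendering of B's two indices
lemma pvMain (ps : List String) (hok : ∀ item ∈ ps, pvOK item)
    (idx : Int) (fa fg : Option Int) (inv : List String)
    (seen : PySem.Set String) (ordered : List String)
    (hba : ∀ a, fa = some a → a < idx) (hbg : ∀ g, fg = some g → g < idx)
    (hsa : PySem.Set.contains seen "aws" = fa.isSome)
    (hsg : PySem.Set.contains seen "github" = fg.isSome)
    (hor : ordered = pvRender fa fg) :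
    ((PySem.List.enumerate ps idx).foldl pvBStep (fa, fg, inv)).2.2 = inv ∧
    (((ps.filter (fun item => !(PySem.Str.strip item == ""))).map
        (fun item => PySem.Str.lower (PySem.Str.strip item))).foldl pvAStep (seen, ordered)).2
      = pvRender ((PySem.List.enumerate ps idx).foldl pvBStep (fa, fg, inv)).1
          ((PySem.List.enumerate ps idx).foldl pvBStep (fa, fg, inv)).2.1 := by
  induction ps generalizing idx fa fg inv seen ordered with
  | nil => simp [PySem.List.enumerate_nil, hor]
  | cons x xs ih =>
    have hx := hok x (by simp)
    have hxs : ∀ item ∈ xs, pvOK item := fun i hi => hok i (by simp [hi])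
    rw [PySem.List.enumerate_cons]
    by_cases he : PySem.Str.strip x = ""
    · have hle : PySem.Str.lower (PySem.Str.strip x) = "" := by rw [he]; rfl
      simp only [List.foldl_cons, List.filter_cons]
      rw [show pvBStep (fa, fg, inv) (idx, x) = (fa, fg, inv) by simp [pvBStep, hle]]
      rw [if_neg (by simp [he])]
      exact ih hxs (idx + 1) fa fg inv seen ordered
        (fun a ha => lt_trans (hba a ha) (by omega))
        (fun g hg => lt_trans (hbg g hg) (by omega)) hsa hsg hor
    · have hne : PySem.Str.lower (PySem.Str.strip x) ≠ "" := by
        intro h; exact he ((pvLowerEmpty _).mp h)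
      simp only [List.foldl_cons, List.filter_cons]
      rw [if_pos (by simp [he])]
      rw [List.map_cons, List.foldl_cons]
      rcases hx he with hs | hs
      · -- item is "aws"
        cases hfa : fa with
        | none =>
          rw [show pvBStep (none, fg, inv) (idx, x) = (some idx, fg, inv) by
              simp [pvBStep, hne, hs]]
          rw [show pvAStep (seen, ordered) (PySem.Str.lower (PySem.Str.strip x))
                = (PySem.Set.add seen "aws", ordered ++ ["aws"]) by
              simp only [pvAStep, hs]; rw [hsa, hfa]; simp]
          refine ih hxs (idx + 1) (some idx) fg inv _ _
            (fun a ha => by simp at ha; omega)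
            (fun g hg => lt_trans (hbg g hg) (by omega)) ?_ ?_ ?_
          · rw [pvContains_add, hsa, hfa]; simp
          · rw [pvContains_add, hsg]
            simp [show (("github" : String) == "aws") = false by decide]
          · cases hfg : fg with
            | none => simp [hor, hfa, hfg, pvRender]
            | some g =>
              have hg := hbg g hfg
              simp [hor, hfa, hfg, pvRender, show ¬ (idx < g) by omega]
        | some a =>
          rw [show pvBStep (some a, fg, inv) (idx, x) = (some a, fg, inv) by
              simp [pvBStep, hne, hs]]
          rw [show pvAStep (seen, ordered) (PySem.Str.lower (PySem.Str.strip x))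
                = (seen, ordered) by simp only [pvAStep, hs]; rw [hsa, hfa]; simp]
          exact ih hxs (idx + 1) (some a) fg inv seen ordered
            (fun a' ha' => by simp at ha'; rw [← ha']; have := hba a hfa; omega)
            (fun g hg => lt_trans (hbg g hg) (by omega))
            (by rw [hsa, hfa]) hsg (by rw [hor, hfa])
      · -- item is "github"
        have hng : PySem.Str.lower (PySem.Str.strip x) ≠ "aws" := by
          rw [hs]; decide
        cases hfg : fg with
        | none =>
          rw [show pvBStep (fa, none, inv) (idx, x) = (fa, some idx, inv) by
              simp [pvBStep, hne, hng, hs]]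
          rw [show pvAStep (seen, ordered) (PySem.Str.lower (PySem.Str.strip x))
                = (PySem.Set.add seen "github", ordered ++ ["github"]) by
              simp only [pvAStep, hs]; rw [hsg, hfg]; simp]
          refine ih hxs (idx + 1) fa (some idx) inv _ _
            (fun a ha => lt_trans (hba a ha) (by omega))
            (fun g hg => by simp at hg; omega) ?_ ?_ ?_
          · rw [pvContains_add, hsa]
            simp [show (("aws" : String) == "github") = false by decide]
          · rw [pvContains_add, hsg, hfg]; simp
          · cases hfa : fa with
            | none => simp [hor, hfa, hfg, pvRender]
            | some a =>
              have ha := hba a hfa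
              simp [hor, hfa, hfg, pvRender, show a < idx by omega]
        | some g =>
          rw [show pvBStep (fa, some g, inv) (idx, x) = (fa, some g, inv) by
              simp [pvBStep, hne, hng, hs]]
          rw [show pvAStep (seen, ordered) (PySem.Str.lower (PySem.Str.strip x))
                = (seen, ordered) by simp only [pvAStep, hs]; rw [hsg, hfg]; simp]
          exact ih hxs (idx + 1) fa (some g) inv seen ordered
            (fun a ha => lt_trans (hba a ha) (by omega))
            (fun g' hg' => by simp at hg'; rw [← hg']; have := hbg g hfg; omega)
            hsa (by rw [hsg, hfg]) (by rw [hor, hfg])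

lemma pvOK_contains {item : String} (h : pvOK item) (hs : PySem.Str.strip item ≠ "") :
    PySem.Set.contains (PySem.Set.ofList ["aws", "github"])
      (PySem.Str.lower (PySem.Str.strip item)) = true := by
  rcases h hs with h' | h' <;> simp [h', PySem.Set.contains, PySem.Set.ofList, PySem.Set.add]

-- A's dedup fold only appends to the ordered list
lemma pvAStep_prefix (l : List String) (sd : PySem.Set String × List String) :
    ∃ t, (l.foldl pvAStep sd).2 = sd.2 ++ t := by
  induction l generalizing sd with
  | nil => exact ⟨[], by simp⟩
  | cons x xs ih =>
    simp only [List.foldl_cons]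
    by_cases hx : x ∈ sd.1
    · rw [show pvAStep sd x = sd by simp [pvAStep, PySem.Set.contains, hx]]
      exact ih sd
    · rw [show pvAStep sd x = (PySem.Set.add sd.1 x, sd.2 ++ [x]) by
        simp [pvAStep, PySem.Set.contains, PySem.Set.add, hx]]
      rcases ih (PySem.Set.add sd.1 x, sd.2 ++ [x]) with ⟨t, ht⟩
      exact ⟨x :: t, by simp at ht; simp [ht]⟩

-- on nonempty normalized input the dedup fold's output is nonempty
lemma pvOrderedNe (x : String) (xs : List String) :
    ((x :: xs).foldl pvAStep (PySem.Set.empty, [])).2 ≠ [] := by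
  rcases pvAStep_prefix xs (PySem.Set.add PySem.Set.empty x, [x]) with ⟨t, ht⟩
  have hthis : ((x :: xs).foldl pvAStep (PySem.Set.empty, [])).2 = [x] ++ t := by
    rw [List.foldl_cons,
      show pvAStep (PySem.Set.empty, []) x = (PySem.Set.add PySem.Set.empty x, [x]) by
        simp [pvAStep, PySem.Set.contains, PySem.Set.empty]]
    exact ht
  rw [Ne, hthis]
  simp

-- ===== VERDICT =====
theorem normalize_providers_py_spec : Claim_equal_normalize_providers_py := by
  intro providers _ hpre
  unfold Spec_normalize_providers_py
  match providers with
  | none => rfl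
  | some ps =>
    by_cases hnil : ps = []
    · subst hnil; rfl
    · have hok : ∀ item ∈ ps, pvOK item := by
        intro i hi; exact hpre i (by simpa using hi)
      obtain ⟨hinv, hord⟩ := pvMain ps hok 0 none none [] PySem.Set.empty []
        (by simp) (by simp) (by simp [PySem.Set.contains, PySem.Set.empty])
        (by simp [PySem.Set.contains, PySem.Set.empty]) rfl
      simp only [normalize_providers_py, normalize_providers_py_alt, if_neg hnil]
      set stB := (PySem.List.enumerate ps 0).foldl pvBStep (none, none, []) with hstB
      rw [if_neg (show ¬ stB.2.2 ≠ [] by simp [hinv])]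
      set normalized := (ps.filter (fun item => !(PySem.Str.strip item == ""))).map
        (fun item => PySem.Str.lower (PySem.Str.strip item)) with hn
      have hinvP : ∀ a ∈ normalized,
          PySem.Set.contains (PySem.Set.ofList ["aws", "github"]) a = true := by
        intro a ha
        rw [hn] at ha
        rcases List.mem_map.mp ha with ⟨i, hi, hia⟩
        have := pvOK_contains (hok i (List.mem_of_mem_filter hi))
          (by simpa using List.of_mem_filter hi)
        rw [← hia]; exact this
      by_cases hne : normalized = []
      · rw [if_pos hne]
        rw [hne] at hord
        simp only [List.foldl_nil] at hord
        cases hfa : stB.1 with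
        | none =>
          cases hfg : stB.2.1 with
          | none => rfl
          | some g => rw [hfa, hfg] at hord; simp [pvRender] at hord
        | some a => rw [hfa] at hord; cases hfg : stB.2.1 <;>
            (rw [hfg] at hord; simp [pvRender] at hord; try split at hord) <;> simp_all
      · rcases List.exists_cons_of_ne_nil hne with ⟨x, xs, hxx⟩
        have hordne : (normalized.foldl pvAStep (PySem.Set.empty, [])).2 ≠ [] := by
          rw [hxx]; exact pvOrderedNe x xs
        rw [if_neg hne, if_neg (by
          simp only [ne_eq, not_not, List.filter_eq_nil_iff]
          intro a ha
          have := hinvP a ha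
          simp [PySem.Set.contains, PySem.Set.ofList, PySem.Set.add] at this
          rcases this with h | h <;> simp [h, PySem.Set.contains, PySem.Set.ofList, PySem.Set.add])]
        rw [hord]
        cases hfa : stB.1 with
        | none =>
          cases hfg : stB.2.1 with
          | none =>
            exfalso; apply hordne; rw [hord, hfa, hfg]; rfl
          | some g => rfl
        | some a =>
          cases hfg : stB.2.1 with
          | none => rfl
          | some g => simp [pvRender]
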